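-- pv_equiv track=rewrite | github.com/omelyanchikd/advent_of_code | day9/day9.py | update_regions_with_point
-- ===== SOURCE A (Python) =====
-- def points_are_neighbors(a, b):
--     i, j = b[0], b[1]
--     candidates = [(i-1, j), (i+1, j), (i, j-1), (i, j+1)]
--     for candidate in candidates:
--         if a == candidate:
--             return True
--     return False
--
-- def point_belongs_to_region(point, region):
--     for element in region:
--         if points_are_neighbors(point, element):
--             return True
--     return False
--
-- def update_regions_with_point(point, regions):
--     regions_to_merge = []
--     for i, region in enumerate(regions):
--         if point_belongs_to_region(point, region):
--             regions_to_merge.append(i)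
--     if len(regions_to_merge) == 0:
--         regions.append([point])
--     elif len(regions_to_merge) == 1:
--         regions[regions_to_merge[0]].append(point)
--     else:
--         merged_region = [point]
--         for i in regions_to_merge:
--             merged_region += regions[i]
--         regions = [regions[i] for i in range(len(regions)) if i not in regions_to_merge]
--         regions.append(merged_region)
--     return regions
-- ===== SOURCE B (Python) =====
-- def update_regions_with_point(point, regions):
--     # Coordinate index: map each element coordinate to the set of region indices containing it,
--     # so membership is found by four dict lookups instead of scanning every element of every region.
--     index = {}
--     for i, region in enumerate(regions):
--         for coord in region:
--             index.setdefault(coord, set()).add(i)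
--     x, y = point
--     hits = set()
--     for neighbor in ((x - 1, y), (x + 1, y), (x, y - 1), (x, y + 1)):
--         hits |= index.get(neighbor, set())
--     regions_to_merge = sorted(hits)
--     if not regions_to_merge:
--         regions.append([point])
--     elif len(regions_to_merge) == 1:
--         regions[regions_to_merge[0]].append(point)
--     else:
--         merged_region = [point]
--         for i in regions_to_merge:
--             merged_region += regions[i]
--         regions = [regions[i] for i in range(len(regions)) if i not in hits]
--         regions.append(merged_region)
--     return regions
-- ===== Notes on version B (the rewrite author's own statement) =====
-- stated objective: alternative
-- what changed: Instead of testing the point against every element of every region with a nested neighbor-candidate scan, B builds a dict mapping each coordinate to the set of region indices containing it in one pass, looks up the point's four grid neighbors, and sorts the union of the index sets to get regions_to_merge; the three-way append/extend/merge branch is kept unchanged.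
import Mathlib
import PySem

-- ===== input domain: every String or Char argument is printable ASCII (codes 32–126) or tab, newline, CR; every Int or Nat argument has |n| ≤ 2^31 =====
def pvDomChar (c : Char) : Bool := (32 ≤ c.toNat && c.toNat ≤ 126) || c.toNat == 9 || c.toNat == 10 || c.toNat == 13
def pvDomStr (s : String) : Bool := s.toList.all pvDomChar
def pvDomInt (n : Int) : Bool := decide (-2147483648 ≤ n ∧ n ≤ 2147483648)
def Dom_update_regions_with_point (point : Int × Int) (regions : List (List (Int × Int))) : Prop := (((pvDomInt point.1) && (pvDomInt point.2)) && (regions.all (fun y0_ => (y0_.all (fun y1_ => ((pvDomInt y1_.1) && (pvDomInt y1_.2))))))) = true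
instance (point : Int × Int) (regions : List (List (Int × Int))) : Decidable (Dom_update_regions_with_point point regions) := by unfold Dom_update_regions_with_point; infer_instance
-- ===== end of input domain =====

-- B replaces A's per-region nested neighbor scan by a coordinate -> set-of-region-indices dict built
-- in one pass, looked up at the point's four neighbors (objective: alternative decomposition).
-- A mutates `regions` in place in the 0- and 1-match branches; B performs the same mutations;
-- the equivalence proved here is about the RETURN value.

-- ===== PORT A =====
def pvCandidates (b : Int × Int) : List (Int × Int) :=
  [(b.1 - 1, b.2), (b.1 + 1, b.2), (b.1, b.2 - 1), (b.1, b.2 + 1)]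

def points_are_neighbors (a b : Int × Int) : Bool :=
  (pvCandidates b).any (fun candidate => a == candidate)

def point_belongs_to_region (point : Int × Int) (region : List (Int × Int)) : Bool :=
  region.any (fun element => points_are_neighbors point element)

def pvMergeIdx (point : Int × Int) (regions : List (List (Int × Int))) : List Int :=
  (PySem.List.enumerate regions 0).foldl
    (fun acc p => if point_belongs_to_region point p.2 then acc ++ [p.1] else acc) []

def update_regions_with_point (point : Int × Int) (regions : List (List (Int × Int))) : List (List (Int × Int)) :=
  let regions_to_merge := pvMergeIdx point regions
  if regions_to_merge.length == 0 then
    regions ++ [[point]]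
  else if regions_to_merge.length == 1 then
    -- regions[regions_to_merge[0]].append(point): the index comes from enumerate, so 0 ≤ i < len
    -- and List.set i.toNat is exact here
    let i := PySem.List.pyGetD regions_to_merge 0 0
    regions.set i.toNat ((PySem.List.pyGetD regions i []) ++ [point])
  else
    let merged_region := regions_to_merge.foldl (fun acc i => acc ++ PySem.List.pyGetD regions i []) [point]
    (((PySem.List.pyRange 0 (regions.length : Int) 1).filter
        (fun i => !(regions_to_merge.contains i))).map (fun i => PySem.List.pyGetD regions i [])) ++ [merged_region]

-- ===== PORT B =====
def pvIndex (regions : List (List (Int × Int))) : PySem.Dict (Int × Int) (PySem.Set Int) :=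
  (PySem.List.enumerate regions 0).foldl
    (fun d p => p.2.foldl (fun d coord => d.insert coord (PySem.Set.add (d.getD coord PySem.Set.empty) p.1)) d)
    PySem.Dict.empty

def pvNeighbors (point : Int × Int) : List (Int × Int) :=
  [(point.1 - 1, point.2), (point.1 + 1, point.2), (point.1, point.2 - 1), (point.1, point.2 + 1)]

def pvHits (point : Int × Int) (regions : List (List (Int × Int))) : PySem.Set Int :=
  (pvNeighbors point).foldl
    (fun s neighbor => PySem.Set.union s ((pvIndex regions).getD neighbor PySem.Set.empty))
    PySem.Set.empty

def update_regions_with_point_alt (point : Int × Int) (regions : List (List (Int × Int))) : List (List (Int × Int)) :=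
  let hits := pvHits point regions
  -- sorted(hits): a set of Ints consumed by sorted without key — order-independent, exact
  let regions_to_merge := PySem.List.sorted hits (fun x => x) false
  if regions_to_merge.isEmpty then
    regions ++ [[point]]
  else if regions_to_merge.length == 1 then
    let i := PySem.List.pyGetD regions_to_merge 0 0
    regions.set i.toNat ((PySem.List.pyGetD regions i []) ++ [point])
  else
    let merged_region := regions_to_merge.foldl (fun acc i => acc ++ PySem.List.pyGetD regions i []) [point]
    (((PySem.List.pyRange 0 (regions.length : Int) 1).filter
        (fun i => !(hits.contains i))).map (fun i => PySem.List.pyGetD regions i [])) ++ [merged_region]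

-- ===== PRECONDITION & SPEC =====
def Spec_update_regions_with_point (point : Int × Int) (regions : List (List (Int × Int))) (out : List (List (Int × Int))) : Prop := out = update_regions_with_point_alt point regions
instance (point : Int × Int) (regions : List (List (Int × Int))) (out : List (List (Int × Int))) : Decidable (Spec_update_regions_with_point point regions out) := by unfold Spec_update_regions_with_point; infer_instance

-- ===== CLAIM (what is proved, stated in full; the proofs are below) =====
def Claim_equal_update_regions_with_point : Prop := ∀ (point : Int × Int) (regions : List (List (Int × Int))), Dom_update_regions_with_point point regions → Spec_update_regions_with_point point regions (update_regions_with_point point regions)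

-- ===== LEMMAS AND PROOFS =====

-- the inner dict-building loop over one region's coordinates
theorem pv_inner_getD (i : Int) (r : List (Int × Int)) (d : PySem.Dict (Int × Int) (PySem.Set Int)) (c : Int × Int) :
    (r.foldl (fun d coord => d.insert coord (PySem.Set.add (d.getD coord PySem.Set.empty) i)) d).getD c PySem.Set.empty
      = if c ∈ r then PySem.Set.add (d.getD c PySem.Set.empty) i else d.getD c PySem.Set.empty := by
  induction r generalizing d with
  | nil => simp
  | cons hd tl ih =>
    simp only [List.foldl_cons, ih]
    by_cases hc : c = hd
    · subst hc
      rw [PySem.Dict.getD_insert_self]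
      by_cases hm : c ∈ tl
      · have hadd : i ∈ PySem.Set.add (d.getD c PySem.Set.empty) i := by simp [PySem.Set.mem_add]
        rw [if_pos hm, if_pos (List.mem_cons_self), PySem.Set.add_of_mem hadd]
      · simp [hm]
    · rw [PySem.Dict.getD_insert_of_ne _ _ _ hc]
      by_cases hm : c ∈ tl <;> simp [hm, hc]

-- the outer dict-building loop, with its getD traced through
theorem pv_index_getD (ps : List (Int × List (Int × Int))) (d : PySem.Dict (Int × Int) (PySem.Set Int)) (c : Int × Int) :
    (ps.foldl (fun d p => p.2.foldl (fun d coord => d.insert coord (PySem.Set.add (d.getD coord PySem.Set.empty) p.1)) d) d).getD c PySem.Set.empty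
      = ps.foldl (fun s p => if c ∈ p.2 then PySem.Set.add s p.1 else s) (d.getD c PySem.Set.empty) := by
  induction ps generalizing d with
  | nil => rfl
  | cons hd tl ih => simp only [List.foldl_cons, ih, pv_inner_getD]

theorem pv_scalar_fold (ps : List (Int × List (Int × Int))) (s : PySem.Set Int) (c : Int × Int) (h : s.Nodup) :
    (ps.foldl (fun s p => if c ∈ p.2 then PySem.Set.add s p.1 else s) s).Nodup
    ∧ ∀ j : Int, j ∈ ps.foldl (fun s p => if c ∈ p.2 then PySem.Set.add s p.1 else s) s
        ↔ j ∈ s ∨ ∃ p ∈ ps, c ∈ p.2 ∧ j = p.1 := by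
  induction ps generalizing s with
  | nil => simpa using h
  | cons hd tl ih =>
    simp only [List.foldl_cons]
    by_cases hm : c ∈ hd.2
    · rw [if_pos hm]
      have := ih (PySem.Set.add s hd.1) (PySem.Set.nodup_add _ _ h)
      refine ⟨this.1, fun j => ?_⟩
      rw [this.2, PySem.Set.mem_add]
      constructor
      · rintro ((hj | hj) | ⟨p, hp, hcp, rfl⟩)
        · exact Or.inl hj
        · exact Or.inr ⟨hd, by simp, hm, hj⟩
        · exact Or.inr ⟨p, by simp [hp], hcp, rfl⟩
      · rintro (hj | ⟨p, hp, hcp, rfl⟩)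
        · exact Or.inl (Or.inl hj)
        · rcases List.mem_cons.mp hp with rfl | hp
          · exact Or.inl (Or.inr rfl)
          · exact Or.inr ⟨p, hp, hcp, rfl⟩
    · rw [if_neg hm]
      have := ih s h
      refine ⟨this.1, fun j => ?_⟩
      rw [this.2]
      constructor
      · rintro (hj | ⟨p, hp, hcp, rfl⟩)
        · exact Or.inl hj
        · exact Or.inr ⟨p, by simp [hp], hcp, rfl⟩
      · rintro (hj | ⟨p, hp, hcp, rfl⟩)
        · exact Or.inl hj
        · rcases List.mem_cons.mp hp with rfl | hp
          · exact absurd hcp hm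
          · exact Or.inr ⟨p, hp, hcp, rfl⟩

theorem pv_index_mem (regions : List (List (Int × Int))) (c : Int × Int) (j : Int) :
    j ∈ (pvIndex regions).getD c PySem.Set.empty
      ↔ ∃ p ∈ PySem.List.enumerate regions 0, c ∈ p.2 ∧ j = p.1 := by
  unfold pvIndex
  rw [pv_index_getD]
  have h := pv_scalar_fold (PySem.List.enumerate regions 0)
      ((PySem.Dict.empty : PySem.Dict (Int × Int) (PySem.Set Int)).getD c PySem.Set.empty) c
      (by simp [PySem.Dict.empty, PySem.Dict.getD, PySem.Dict.get?, PySem.Set.empty])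
  rw [h.2]
  simp [PySem.Dict.empty, PySem.Dict.getD, PySem.Dict.get?, PySem.Set.empty]

theorem pv_hits_nodup (point : Int × Int) (regions : List (List (Int × Int))) :
    (pvHits point regions).Nodup := by
  unfold pvHits pvNeighbors
  simp only [List.foldl_cons, List.foldl_nil]
  exact PySem.Set.nodup_union _ _ (PySem.Set.nodup_union _ _ (PySem.Set.nodup_union _ _
    (PySem.Set.nodup_union _ _ List.nodup_nil)))

theorem pv_hits_mem (point : Int × Int) (regions : List (List (Int × Int))) (j : Int) :
    j ∈ pvHits point regions
      ↔ ∃ nb ∈ pvCandidates point, ∃ p ∈ PySem.List.enumerate regions 0, nb ∈ p.2 ∧ j = p.1 := by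
  unfold pvHits pvNeighbors
  simp only [List.foldl_cons, List.foldl_nil, PySem.Set.mem_union, pv_index_mem, pvCandidates]
  simp only [List.mem_cons, List.not_mem_nil, PySem.Set.empty, or_false]
  constructor
  · rintro (((h | h) | h) | h)
    · rcases h with (h | h)
      · simp at h
      · exact ⟨_, Or.inl rfl, h⟩
    · exact ⟨_, Or.inr (Or.inl rfl), h⟩
    · exact ⟨_, Or.inr (Or.inr (Or.inl rfl)), h⟩
    · exact ⟨_, Or.inr (Or.inr (Or.inr rfl)), h⟩
  · rintro ⟨nb, (rfl | rfl | rfl | rfl), hh⟩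
    · exact Or.inl (Or.inl (Or.inl (Or.inr hh)))
    · exact Or.inl (Or.inl (Or.inr hh))
    · exact Or.inl (Or.inr hh)
    · exact Or.inr hh

-- grid adjacency is symmetric
theorem pv_neighbors_symm (a b : Int × Int) : a ∈ pvCandidates b ↔ b ∈ pvCandidates a := by
  obtain ⟨a1, a2⟩ := a; obtain ⟨b1, b2⟩ := b
  simp only [pvCandidates, List.mem_cons, List.not_mem_nil, or_false, Prod.mk.injEq]
  omega

theorem pv_belongs_iff (point : Int × Int) (r : List (Int × Int)) :
    point_belongs_to_region point r = true ↔ ∃ e ∈ r, e ∈ pvCandidates point := by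
  unfold point_belongs_to_region points_are_neighbors
  simp only [List.any_eq_true, beq_iff_eq]
  constructor
  · rintro ⟨e, he, c, hc, rfl⟩
    exact ⟨e, he, (pv_neighbors_symm _ _).mp hc⟩
  · rintro ⟨e, he, hc⟩
    exact ⟨e, he, point, (pv_neighbors_symm _ _).mpr hc, rfl⟩

theorem pv_mergeIdx_eq (point : Int × Int) (regions : List (List (Int × Int))) :
    pvMergeIdx point regions
      = ((PySem.List.enumerate regions 0).filter (fun p => point_belongs_to_region point p.2)).map (·.1) := by
  unfold pvMergeIdx
  rw [PySem.List.foldl_append_if]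
  simp

theorem pv_mergeIdx_pairwise (point : Int × Int) (regions : List (List (Int × Int))) :
    (pvMergeIdx point regions).Pairwise (· < ·) := by
  rw [pv_mergeIdx_eq]
  have hsub : (((PySem.List.enumerate regions 0).filter (fun p => point_belongs_to_region point p.2)).map (·.1)).Sublist
      ((PySem.List.enumerate regions 0).map (·.1)) :=
    ((PySem.List.enumerate regions 0).filter_sublist).map _
  have hpr : ((PySem.List.enumerate regions 0).map (·.1)).Pairwise (· < ·) := by
    rw [PySem.List.map_fst_enumerate]
    exact PySem.List.pairwise_lt_pyRange_one _ _
  exact hpr.sublist hsub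

theorem pv_mergeIdx_mem (point : Int × Int) (regions : List (List (Int × Int))) (j : Int) :
    j ∈ pvMergeIdx point regions
      ↔ ∃ p ∈ PySem.List.enumerate regions 0, point_belongs_to_region point p.2 = true ∧ j = p.1 := by
  rw [pv_mergeIdx_eq]
  simp only [List.mem_map, List.mem_filter]
  constructor
  · rintro ⟨p, ⟨hp, hb⟩, rfl⟩; exact ⟨p, hp, hb, rfl⟩
  · rintro ⟨p, hp, hb, rfl⟩; exact ⟨p, ⟨hp, hb⟩, rfl⟩

theorem pv_perm (point : Int × Int) (regions : List (List (Int × Int))) :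
    (pvMergeIdx point regions).Perm (pvHits point regions) := by
  refine (List.perm_ext_iff_of_nodup ((pv_mergeIdx_pairwise point regions).nodup) (pv_hits_nodup point regions)).mpr fun j => ?_
  rw [pv_mergeIdx_mem, pv_hits_mem]
  constructor
  · rintro ⟨p, hp, hb, rfl⟩
    obtain ⟨e, he, hc⟩ := (pv_belongs_iff point p.2).mp hb
    exact ⟨e, hc, p, hp, he, rfl⟩
  · rintro ⟨nb, hnb, p, hp, hin, rfl⟩
    exact ⟨p, hp, (pv_belongs_iff point p.2).mpr ⟨nb, hin, hnb⟩, rfl⟩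

theorem pv_sorted_eq (point : Int × Int) (regions : List (List (Int × Int))) :
    PySem.List.sorted (pvHits point regions) (fun x => x) false = pvMergeIdx point regions :=
  PySem.List.sorted_eq_of_perm_of_pairwise_lt _ _ _ (pv_perm point regions) (pv_mergeIdx_pairwise point regions)

theorem pv_contains_eq (point : Int × Int) (regions : List (List (Int × Int))) (i : Int) :
    (pvHits point regions).contains i = (pvMergeIdx point regions).contains i := by
  rw [Bool.eq_iff_iff, List.contains_iff_mem]
  simp only [PySem.Set.contains]
  rw [List.contains_iff_mem]
  exact ((pv_perm point regions).mem_iff).symm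

-- ===== VERDICT (by name: the statement is the Claim_ definition above) =====
theorem update_regions_with_point_spec : Claim_equal_update_regions_with_point := by
  intro point regions _
  unfold Spec_update_regions_with_point update_regions_with_point update_regions_with_point_alt
  simp only [pv_sorted_eq, pv_contains_eq]
  cases pvMergeIdx point regions <;> rfl
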